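-- pv_equiv track=rewrite | github.com/mariocervera/LeetCode | 2310_sum_of_numbers_with_units_digit_k.py | minimumNumbers
-- ===== SOURCE A (Python) =====
-- def minimumNumbers(num, k):
--     dp = [0] + [float("inf")] * num
--     candidates = list(range(k, num+1, 10))
--     for i in range(1, num+1):
--         for candidate in candidates:
--             if i-candidate >= 0 and dp[i-candidate] != float("inf"):
--                 dp[i] = min(dp[i], dp[i-candidate] + 1)
--     return dp[num] if dp[num] != float("inf") else -1
-- ===== SOURCE B (Python) =====
-- def minimumNumbers(num, k):
--     if num == 0:
--         return 0
--     for c in range(1, 11):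
--         if c * k <= num and (num - c * k) % 10 == 0:
--             return c
--     return -1
-- ===== Notes on version B (the rewrite author's own statement) =====
-- stated objective: faster
-- what changed: Replaced the O(num^2/10) coin-change dynamic programme over a dp table of size num+1 by a constant-time scan of candidate counts c = 1..10, using that c numbers ending in digit k can sum to num iff c*k <= num and (num - c*k) % 10 == 0 and that any feasible count can be reduced below 11.
-- intended difference: For num = -1 (the only negative num A accepts) A's final dp[-1] wraps around to dp[0] and it returns 0; B returns -1, the intended 'impossible' answer, since no positive count of numbers ending in digit k sums to a negative total. — e.g. on minimumNumbers(-1, 5): A returns 0, B returns -1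
import Mathlib
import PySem

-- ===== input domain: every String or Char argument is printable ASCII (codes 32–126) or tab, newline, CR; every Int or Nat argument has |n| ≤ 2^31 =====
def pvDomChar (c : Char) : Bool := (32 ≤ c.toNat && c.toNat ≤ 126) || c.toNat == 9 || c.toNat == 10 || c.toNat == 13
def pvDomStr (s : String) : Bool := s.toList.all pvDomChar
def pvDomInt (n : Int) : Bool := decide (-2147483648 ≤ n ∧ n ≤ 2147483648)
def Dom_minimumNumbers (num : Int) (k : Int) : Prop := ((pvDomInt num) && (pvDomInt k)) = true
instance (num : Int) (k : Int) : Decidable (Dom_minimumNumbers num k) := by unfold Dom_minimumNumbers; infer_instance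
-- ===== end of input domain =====

-- B replaces A's O(num^2/10) coin-change DP by the O(1) number-theoretic scan of counts 1..10 (objective: faster, asymptotic).

-- ===== PORT A =====
-- dp entries: `none` = float("inf"), `some m` = the int m.
def aInner (dp : List (Option Int)) (i cand : Int) : List (Option Int) :=
  if i - cand ≥ 0 then
    match PySem.List.pyGet? dp (i - cand) with
    | some (some m) =>
      match PySem.List.pyGet? dp i with
      | some (some cur) => dp.set i.toNat (some (min cur (m + 1)))
      | some none => dp.set i.toNat (some (m + 1))
      | none => dp
    | _ => dp
  else dp

def minimumNumbers (num : Int) (k : Int) : Int :=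
  let dp0 : List (Option Int) := [some 0] ++ List.replicate num.toNat none
  let candidates : List Int := PySem.List.pyRange k (num + 1) 10
  let dp := (PySem.List.pyRange 1 (num + 1) 1).foldl
    (fun dp i => candidates.foldl (fun d cand => aInner d i cand) dp) dp0
  match PySem.List.pyGet? dp num with
  | some (some v) => v
  | _ => -1

-- ===== PORT B =====
def altLoop (num k : Int) : List Int → Int
  | [] => -1
  | c :: rest =>
    if c * k ≤ num ∧ PySem.Int.mod (num - c * k) 10 = 0 then c else altLoop num k rest

def minimumNumbers_alt (num : Int) (k : Int) : Int :=
  if num = 0 then 0 else altLoop num k (PySem.List.pyRange 1 11 1)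

-- ===== PRECONDITION & SPEC =====
-- Pre_ excludes exactly the inputs on which A raises IndexError: num ≤ -2 (dp[num] out of range),
-- and num ≥ 1 with k < 0 (the negative candidate makes dp[i-candidate] overrun the list).
def Pre_minimumNumbers (num : Int) (k : Int) : Prop := -1 ≤ num ∧ (num ≤ 0 ∨ 0 ≤ k)
instance (num : Int) (k : Int) : Decidable (Pre_minimumNumbers num k) := by
  unfold Pre_minimumNumbers; infer_instance
def pvWitness_minimumNumbers : Int × Int := (58, 9)

-- For num = -1 (the only negative num A accepts) A's final dp[-1] wraps around to dp[0] and it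
-- returns 0; B returns -1, the intended "impossible" answer, since no positive count of numbers
-- ending in digit k can sum to a negative total.
def D_minimumNumbers (num : Int) (k : Int) : Prop := num = -1
instance (num : Int) (k : Int) : Decidable (D_minimumNumbers num k) := by
  unfold D_minimumNumbers; infer_instance

def Spec_minimumNumbers (num : Int) (k : Int) (out : Int) : Prop :=
  ¬ D_minimumNumbers num k → out = minimumNumbers_alt num k
instance (num : Int) (k : Int) (out : Int) : Decidable (Spec_minimumNumbers num k out) := by
  unfold Spec_minimumNumbers; infer_instance

def pvDiffWitness_minimumNumbers : Int × Int := (-1, 5)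
def pvDiffWitnessOut_minimumNumbers : Int × Int := (0, -1)

-- ===== CLAIM (what is proved, stated in full; the proofs are below) =====
def Claim_unchanged_minimumNumbers : Prop := ∀ (num : Int) (k : Int), Dom_minimumNumbers num k → Pre_minimumNumbers num k → Spec_minimumNumbers num k (minimumNumbers num k)
def Claim_changed_minimumNumbers : Prop := Dom_minimumNumbers (pvDiffWitness_minimumNumbers.1) (pvDiffWitness_minimumNumbers.2) ∧ Pre_minimumNumbers (pvDiffWitness_minimumNumbers.1) (pvDiffWitness_minimumNumbers.2) ∧ D_minimumNumbers (pvDiffWitness_minimumNumbers.1) (pvDiffWitness_minimumNumbers.2) ∧ minimumNumbers (pvDiffWitness_minimumNumbers.1) (pvDiffWitness_minimumNumbers.2) = pvDiffWitnessOut_minimumNumbers.1 ∧ minimumNumbers_alt (pvDiffWitness_minimumNumbers.1) (pvDiffWitness_minimumNumbers.2) = pvDiffWitnessOut_minimumNumbers.2 ∧ pvDiffWitnessOut_minimumNumbers.1 ≠ pvDiffWitnessOut_minimumNumbers.2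
def Claim_exact_minimumNumbers : Prop := ∀ (num : Int) (k : Int), Dom_minimumNumbers num k → Pre_minimumNumbers num k → D_minimumNumbers num k → minimumNumbers num k ≠ minimumNumbers_alt num k

-- ===== LEMMAS AND PROOFS =====

-- "count c of numbers ending in digit k can sum to t": c*k ≤ t and 10 | t - c*k.
def QP (t k c : Int) : Prop := c * k ≤ t ∧ PySem.Int.mod (t - c * k) 10 = 0

-- first c in [c0, c0+fuel) with QP t k c, else none
def gfind (t k : Int) : ℕ → Int → Option Int
  | 0, _ => none
  | f + 1, c =>
    if c * k ≤ t ∧ PySem.Int.mod (t - c * k) 10 = 0 then some c else gfind t k f (c + 1)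

-- the intended dp value at sub-target t
def G (k t : Int) : Option Int := if t = 0 then some 0 else gfind t k 10 1

-- dp after the outer loop has processed i = 1..j
def dpSpec (k num j : Int) : List (Option Int) :=
  (List.range (num.toNat + 1)).map (fun t : ℕ => if (t : Int) ≤ j then G k (t : Int) else none)

-- effect of one inner-loop step on the value stored at index i
def accStep (dp : List (Option Int)) (i : Int) (acc : Option Int) (c : Int) : Option Int :=
  if 0 ≤ i - c then
    match PySem.List.pyGet? dp (i - c) with
    | some (some m) =>
      some (match acc with | some cur => min cur (m + 1) | none => m + 1)
    | _ => acc
  else acc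

theorem altLoop_eq_gfind (num k : Int) : ∀ (f : ℕ) (c : Int),
    altLoop num k (PySem.List.pyRange c (c + (f : Int)) 1) =
      (match gfind num k f c with | some v => v | none => -1) := by
  intro f
  induction f with
  | zero => intro c; simp [PySem.List.pyRange_one_eq_nil, altLoop, gfind]
  | succ f ih =>
    intro c
    rw [PySem.List.pyRange_one_cons (by push_cast; omega)]
    show altLoop num k (c :: _) = _
    rw [altLoop]
    rw [gfind]
    by_cases h : c * k ≤ num ∧ PySem.Int.mod (num - c * k) 10 = 0
    · rw [if_pos h, if_pos h]
    · rw [if_neg h, if_neg h]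
      rw [show c + (((f : ℕ) + 1 : ℕ) : Int) = (c + 1) + (f : Int) by push_cast; ring]
      exact ih (c + 1)
theorem gfind_some (t k : Int) : ∀ (f : ℕ) (c v : Int), gfind t k f c = some v →
    c ≤ v ∧ v < c + (f : Int) ∧ QP t k v ∧ ∀ u, c ≤ u → u < v → ¬ QP t k u := by
  intro f
  induction f with
  | zero => intro c v h; simp [gfind] at h
  | succ f ih =>
    intro c v h
    rw [gfind] at h
    by_cases hq : c * k ≤ t ∧ PySem.Int.mod (t - c * k) 10 = 0
    · rw [if_pos hq] at h
      obtain rfl : c = v := by injection h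
      exact ⟨le_refl _, by push_cast; omega, hq, fun u h1 h2 => by omega⟩
    · rw [if_neg hq] at h
      obtain ⟨h1, h2, h3, h4⟩ := ih (c + 1) v h
      refine ⟨by omega, by push_cast at h2 ⊢; omega, h3, ?_⟩
      intro u hu1 hu2
      by_cases huc : u = c
      · subst huc; exact fun hc => hq hc
      · exact h4 u (by omega) hu2
theorem gfind_none (t k : Int) : ∀ (f : ℕ) (c : Int), gfind t k f c = none →
    ∀ u, c ≤ u → u < c + (f : Int) → ¬ QP t k u := by
  intro f
  induction f with
  | zero => intro c _ u h1 h2; push_cast at h2; omega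
  | succ f ih =>
    intro c h u h1 h2
    rw [gfind] at h
    by_cases hq : c * k ≤ t ∧ PySem.Int.mod (t - c * k) 10 = 0
    · rw [if_pos hq] at h; exact absurd h (by simp)
    · rw [if_neg hq] at h
      by_cases huc : u = c
      · subst huc; exact fun hc => hq hc
      · exact ih (c + 1) h u (by omega) (by push_cast at h2 ⊢; omega)
theorem gfind_exists (t k : Int) : ∀ (f : ℕ) (c u : Int), c ≤ u → u < c + (f : Int) →
    QP t k u → ∃ v, gfind t k f c = some v := by
  intro f c u h1 h2 h3
  cases hg : gfind t k f c with
  | some v => exact ⟨v, rfl⟩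
  | none => exact absurd h3 (gfind_none t k f c hg u h1 h2)
theorem red (t k : Int) (hk : 0 ≤ k) :
    ∀ c : Int, 1 ≤ c → QP t k c → ∃ u, 1 ≤ u ∧ u ≤ 10 ∧ QP t k u := by
  intro c
  induction hn : c.toNat using Nat.strong_induction_on generalizing c with
  | _ n ih =>
    intro h1 hq
    by_cases hle : c ≤ 10
    · exact ⟨c, h1, hle, hq⟩
    · obtain ⟨hq1, hq2⟩ := hq
      rw [PySem.Int.mod_eq_zero_iff_dvd] at hq2
      have hdvd : (10 : Int) ∣ t - (c - 10) * k := by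
        have : t - (c - 10) * k = (t - c * k) + 10 * k := by ring
        rw [this]; exact dvd_add hq2 ⟨k, rfl⟩
      have hle2 : (c - 10) * k ≤ t := by nlinarith
      obtain ⟨u, hu⟩ := ih (c - 10).toNat (by omega) (c - 10) rfl (by omega)
        ⟨hle2, (PySem.Int.mod_eq_zero_iff_dvd _ _).2 hdvd⟩
      exact ⟨u, hu⟩
theorem dpSpec_length (k num j : Int) : (dpSpec k num j).length = num.toNat + 1 := by
  simp [dpSpec]

theorem dpSpec_get (k num j t : Int) (ht0 : 0 ≤ t) (ht : t ≤ num) :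
    PySem.List.pyGet? (dpSpec k num j) t = some (if t ≤ j then G k t else none) := by
  rw [PySem.List.pyGet?_of_nonneg _ ht0]
  unfold dpSpec
  rw [List.getElem?_map]
  rw [List.getElem?_range (show t.toNat < num.toNat + 1 by omega)]
  simp only [Option.map_some]
  rw [Int.toNat_of_nonneg ht0]
theorem dpSpec_set (k num i : Int) (h0 : 0 ≤ i) (hi : i ≤ num) :
    (dpSpec k num (i - 1)).set i.toNat (G k i) = dpSpec k num i := by
  apply List.ext_getElem
  · simp [dpSpec]
  · intro n h1 h2
    rw [List.getElem_set]
    unfold dpSpec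
    simp only [List.getElem_map, List.getElem_range]
    unfold dpSpec at h2
    rw [List.length_map, List.length_range] at h2
    by_cases hn : i.toNat = n
    · rw [if_pos hn, if_pos (show (n : Int) ≤ i by omega)]
      congr 1
      omega
    · rw [if_neg hn]
      have he : ((n : Int) ≤ i - 1) ↔ ((n : Int) ≤ i) := by constructor <;> intro h <;> omega
      by_cases hle : (n : Int) ≤ i - 1
      · rw [if_pos hle, if_pos (he.1 hle)]
      · rw [if_neg hle, if_neg (fun hc => hle (he.2 hc))]
theorem set_self {α : Type} (l : List α) (n : ℕ) (v : α) (h : l[n]? = some v) :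
    l.set n v = l := by
  apply List.ext_getElem
  · simp
  · intro m h1 h2
    rw [List.getElem_set]
    by_cases hn : n = m
    · subst hn
      rw [if_pos rfl]
      rw [List.getElem?_eq_getElem h2] at h
      injection h with h; exact h.symm
    · rw [if_neg hn]
-- F4: a some accumulator only decreases
theorem fold_le (dp : List (Option Int)) (i : Int) :
    ∀ (cands : List Int) (a : Int),
      ∃ v, cands.foldl (accStep dp i) (some a) = some v ∧ v ≤ a := by
  intro cands
  induction cands with
  | nil => intro a; exact ⟨a, rfl, le_refl a⟩
  | cons c cs ih =>
    intro a
    rw [List.foldl_cons]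
    unfold accStep
    by_cases hg : 0 ≤ i - c
    · rw [if_pos hg]
      cases hx : PySem.List.pyGet? dp (i - c) with
      | none => exact ih a
      | some o =>
        cases o with
        | none => exact ih a
        | some m =>
          obtain ⟨v, hv, hle⟩ := ih (min a (m + 1))
          exact ⟨v, hv, le_trans hle (min_le_left _ _)⟩
    · rw [if_neg hg]; exact ih a
-- F3: upper bound from any admissible candidate
theorem fold_ub (dp : List (Option Int)) (i : Int) :
    ∀ (cands : List Int) (acc : Option Int) (c m : Int), c ∈ cands → 0 ≤ i - c →
      PySem.List.pyGet? dp (i - c) = some (some m) →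
      ∃ v, cands.foldl (accStep dp i) acc = some v ∧ v ≤ m + 1 := by
  intro cands
  induction cands with
  | nil => intro acc c m hc; exact absurd hc (List.not_mem_nil)
  | cons c0 cs ih =>
    intro acc c m hc hg hget
    rw [List.foldl_cons]
    rcases List.mem_cons.1 hc with rfl | hmem
    · have hstep : accStep dp i acc c = some (match acc with
        | some cur => min cur (m + 1) | none => m + 1) := by
        unfold accStep; rw [if_pos hg, hget]
      rw [hstep]
      cases acc with
      | none => obtain ⟨v, hv, hle⟩ := fold_le dp i cs (m + 1); exact ⟨v, hv, hle⟩
      | some cur =>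
        obtain ⟨v, hv, hle⟩ := fold_le dp i cs (min cur (m + 1))
        exact ⟨v, hv, le_trans hle (min_le_right _ _)⟩
    · exact ih _ c m hmem hg hget
-- F2: any some result comes from the accumulator or from some candidate
theorem fold_some (dp : List (Option Int)) (i : Int) :
    ∀ (cands : List Int) (acc : Option Int) (v : Int),
      cands.foldl (accStep dp i) acc = some v →
      acc = some v ∨ ∃ c ∈ cands, ∃ m, 0 ≤ i - c ∧
        PySem.List.pyGet? dp (i - c) = some (some m) ∧ v = m + 1 := by
  intro cands
  induction cands with
  | nil => intro acc v h; exact Or.inl h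
  | cons c0 cs ih =>
    intro acc v h
    rw [List.foldl_cons] at h
    rcases ih _ v h with hstep | ⟨c, hc, m, hg, hget, rfl⟩
    · -- accStep dp i acc c0 = some v
      unfold accStep at hstep
      by_cases hg : 0 ≤ i - c0
      · rw [if_pos hg] at hstep
        cases hx : PySem.List.pyGet? dp (i - c0) with
        | none => rw [hx] at hstep; exact Or.inl hstep
        | some o =>
          cases o with
          | none => rw [hx] at hstep; exact Or.inl hstep
          | some m =>
            rw [hx] at hstep
            cases acc with
            | none =>
              have h' : m + 1 = v := Option.some.inj hstep
              exact Or.inr ⟨c0, List.mem_cons_self, m, hg, hx, h'.symm⟩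
            | some cur =>
              have h' : min cur (m + 1) = v := Option.some.inj hstep
              rcases min_choice cur (m + 1) with hmin | hmin
              · exact Or.inl (by rw [← h', hmin])
              · exact Or.inr ⟨c0, List.mem_cons_self, m, hg, hx, by omega⟩
      · rw [if_neg hg] at hstep; exact Or.inl hstep
    · exact Or.inr ⟨c, List.mem_cons.2 (Or.inr hc), m, hg, hget, rfl⟩
theorem setfold (i : Int) (hi0 : 0 ≤ i) (dp : List (Option Int))
    (hil : i < (dp.length : Int)) (hdpi : dp[i.toNat]? = some none) :
    ∀ (cands : List Int), (∀ c ∈ cands, 0 ≤ c) → ∀ acc,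
      cands.foldl (fun d c => aInner d i c) (dp.set i.toNat acc) =
        dp.set i.toNat (cands.foldl (accStep dp i) acc) := by
  intro cands
  induction cands with
  | nil => intro _ acc; rfl
  | cons c cs ih =>
    intro hpos acc
    rw [List.foldl_cons, List.foldl_cons]
    have hstep : aInner (dp.set i.toNat acc) i c = dp.set i.toNat (accStep dp i acc c) := by
      have hc0 : 0 ≤ c := hpos c List.mem_cons_self
      unfold aInner accStep
      by_cases hg : 0 ≤ i - c
      · rw [if_pos (show i - c ≥ 0 from hg), if_pos hg]
        have hgets : PySem.List.pyGet? (dp.set i.toNat acc) i = some acc := by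
          rw [PySem.List.pyGet?_of_nonneg _ hi0]
          rw [List.getElem?_set_self (by omega)]
        by_cases hceq : c = 0
        · -- reads index i itself: original dp holds none there
          subst hceq
          have h1 : i - 0 = i := by ring
          rw [h1, hgets]
          rw [PySem.List.pyGet?_of_nonneg _ hi0, hdpi]
          cases acc with
          | none => rfl
          | some m =>
            show (dp.set i.toNat (some m)).set i.toNat (some (min m (m + 1))) =
              dp.set i.toNat (some m)
            have hm : min m (m + 1) = m := by omega
            rw [List.set_set, hm]
        · have hlt : (i - c).toNat ≠ i.toNat := by omega
          have hread : PySem.List.pyGet? (dp.set i.toNat acc) (i - c) =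
              PySem.List.pyGet? dp (i - c) := by
            rw [PySem.List.pyGet?_of_nonneg _ hg, PySem.List.pyGet?_of_nonneg _ hg]
            rw [List.getElem?_set_ne (by omega)]
          rw [hread]
          cases hx : PySem.List.pyGet? dp (i - c) with
          | none => rfl
          | some o =>
            cases o with
            | none => rfl
            | some m =>
              rw [hgets]
              cases acc with
              | none =>
                show (dp.set i.toNat none).set i.toNat (some (m + 1)) =
                  dp.set i.toNat (some (m + 1))
                rw [List.set_set]
              | some cur =>
                show (dp.set i.toNat (some cur)).set i.toNat (some (min cur (m + 1))) =
                  dp.set i.toNat (some (min cur (m + 1)))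
                rw [List.set_set]
      · rw [if_neg (show ¬(i - c ≥ 0) from hg), if_neg hg]
    rw [hstep, ih (fun c hc => hpos c (List.mem_cons.2 (Or.inr hc)))]
theorem decode (num k i c m : Int) (hk : 0 ≤ k) (h1 : 1 ≤ i) (hi : i ≤ num)
    (hc : c ∈ PySem.List.pyRange k (num + 1) 10) (hg : 0 ≤ i - c)
    (hget : PySem.List.pyGet? (dpSpec k num (i - 1)) (i - c) = some (some m)) :
    0 ≤ m ∧ QP i k (m + 1) := by
  rw [PySem.List.mem_pyRange_iff_of_pos (by norm_num)] at hc
  obtain ⟨hkc, hcn, hdc⟩ := hc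
  have hc0 : 0 ≤ c := le_trans hk hkc
  rw [dpSpec_get k num (i - 1) (i - c) hg (by omega)] at hget
  have hG : (i - c ≤ i - 1) ∧ G k (i - c) = some m := by
    by_cases hle : i - c ≤ i - 1
    · rw [if_pos hle] at hget; exact ⟨hle, Option.some.inj hget⟩
    · rw [if_neg hle] at hget; exact absurd (Option.some.inj hget) (by simp)
  obtain ⟨hle, hGm⟩ := hG
  by_cases hz : i - c = 0
  · -- c = i, m = 0
    rw [hz] at hGm
    unfold G at hGm
    rw [if_pos rfl] at hGm
    have hm : m = 0 := by
      have := Option.some.inj hGm; omega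
    subst hm
    refine ⟨le_refl 0, ?_, ?_⟩
    · have : c = i := by omega
      omega
    · rw [PySem.Int.mod_eq_zero_iff_dvd]
      have : i - (0 + 1) * k = (c - k) := by omega
      rw [this]; exact hdc
  · unfold G at hGm
    rw [if_neg hz] at hGm
    obtain ⟨hm1, _, ⟨hq1, hq2⟩, _⟩ := gfind_some (i - c) k 10 1 m hGm
    rw [PySem.Int.mod_eq_zero_iff_dvd] at hq2
    constructor
    · omega
    · constructor
      · nlinarith
      · rw [PySem.Int.mod_eq_zero_iff_dvd]
        have heq : i - (m + 1) * k = (i - c - m * k) + (c - k) := by ring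
        rw [heq]
        exact dvd_add hq2 hdc

theorem encode (num k i v : Int) (hk : 0 ≤ k) (h1 : 1 ≤ i) (hi : i ≤ num)
    (hv : G k i = some v) :
    ∃ c m, c ∈ PySem.List.pyRange k (num + 1) 10 ∧ 0 ≤ i - c ∧
      PySem.List.pyGet? (dpSpec k num (i - 1)) (i - c) = some (some m) ∧ m + 1 ≤ v := by
  unfold G at hv
  rw [if_neg (by omega)] at hv
  obtain ⟨hv1, hv10, ⟨hq1, hq2⟩, _⟩ := gfind_some i k 10 1 v hv
  rw [PySem.Int.mod_eq_zero_iff_dvd] at hq2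
  set t : Int := (v - 1) * k with ht
  have ht0 : 0 ≤ t := mul_nonneg (by omega) hk
  have hvk : v * k = t + k := by rw [ht]; ring
  have hmem : i - t ∈ PySem.List.pyRange k (num + 1) 10 := by
    rw [PySem.List.mem_pyRange_iff_of_pos (by norm_num)]
    refine ⟨by omega, by omega, ?_⟩
    have h3 : i - t - k = i - v * k := by omega
    rw [h3]; exact hq2
  have htle : t ≤ i - 1 := by
    by_cases hv1' : v = 1
    · have : t = 0 := by rw [ht, hv1']; ring
      omega
    · by_cases hkz : k = 0
      · have : t = 0 := by rw [ht, hkz]; ring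
        omega
      · nlinarith
  have hred : i - (i - t) = t := by ring
  have hget : ∃ m, G k t = some m ∧ m + 1 ≤ v := by
    by_cases htz : t = 0
    · refine ⟨0, ?_, by omega⟩
      rw [htz]; unfold G; rw [if_pos rfl]
    · have hv2 : 2 ≤ v := by
        rcases lt_or_ge v 2 with h' | h'
        · exfalso
          apply htz
          have hv1' : v = 1 := by omega
          rw [ht, hv1']; ring
        · exact h'
      have hq : QP t k (v - 1) := by
        constructor
        · rw [ht]
        · rw [PySem.Int.mod_eq_zero_iff_dvd, ht]
          simp
      obtain ⟨m, hm⟩ := gfind_exists t k 10 1 (v - 1) (by omega) (by push_cast; omega) hq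
      obtain ⟨hm1, _, _, hmin⟩ := gfind_some t k 10 1 m hm
      have hmlev : m ≤ v - 1 := by
        by_contra hlt
        exact hmin (v - 1) (by omega) (by omega) hq
      refine ⟨m, ?_, by omega⟩
      unfold G; rw [if_neg htz]; exact hm
  obtain ⟨m, hGm, hmle⟩ := hget
  refine ⟨i - t, m, hmem, by omega, ?_, hmle⟩
  rw [hred, dpSpec_get k num (i - 1) t ht0 (by omega), if_pos htle, hGm]

theorem coreLemma (num k i : Int) (hk : 0 ≤ k) (h1 : 1 ≤ i) (hi : i ≤ num) :
    (PySem.List.pyRange k (num + 1) 10).foldl (accStep (dpSpec k num (i - 1)) i) none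
      = G k i := by
  cases hG : G k i with
  | none =>
    cases hr : (PySem.List.pyRange k (num + 1) 10).foldl (accStep (dpSpec k num (i - 1)) i) none with
    | none => rfl
    | some w =>
      exfalso
      rcases fold_some _ _ _ _ _ hr with h | ⟨c, hc, m, hg, hget, rfl⟩
      · exact absurd h (by simp)
      · obtain ⟨hm0, hQ⟩ := decode num k i c m hk h1 hi hc hg hget
        obtain ⟨u, hu1, hu10, hQu⟩ := red i k hk (m + 1) (by omega) hQ
        unfold G at hG
        rw [if_neg (by omega)] at hG
        exact gfind_none i k 10 1 hG u hu1 (by push_cast; omega) hQu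
  | some v =>
    obtain ⟨c0, m0, hc0, hg0, hget0, hlev⟩ := encode num k i v hk h1 hi hG
    obtain ⟨w, hw, hwle⟩ := fold_ub _ _ _ none c0 m0 hc0 hg0 hget0
    rw [hw]
    rcases fold_some _ _ _ _ _ hw with h | ⟨c, hc, m, hg, hget, rfl⟩
    · exact absurd h (by simp)
    · obtain ⟨hm0, hQ⟩ := decode num k i c m hk h1 hi hc hg hget
      unfold G at hG
      rw [if_neg (by omega)] at hG
      obtain ⟨_, _, _, hmin⟩ := gfind_some i k 10 1 v hG
      have hvle : v ≤ m + 1 := by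
        by_contra hlt
        exact hmin (m + 1) (by omega) (by omega) hQ
      congr 1
      omega

theorem inner (num k i : Int) (hk : 0 ≤ k) (h1 : 1 ≤ i) (hi : i ≤ num) :
    (PySem.List.pyRange k (num + 1) 10).foldl (fun d c => aInner d i c) (dpSpec k num (i - 1))
      = dpSpec k num i := by
  have hlen : ((dpSpec k num (i - 1)).length : Int) = num.toNat + 1 := by
    rw [dpSpec_length]; push_cast; ring
  have hdpi : (dpSpec k num (i - 1))[i.toNat]? = some none := by
    have := dpSpec_get k num (i - 1) i (by omega) hi
    rw [PySem.List.pyGet?_of_nonneg _ (by omega)] at this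
    rw [this, if_neg (by omega)]
  have hset : (dpSpec k num (i - 1)).set i.toNat none = dpSpec k num (i - 1) :=
    set_self _ _ _ hdpi
  conv_lhs => rw [← hset]
  rw [setfold i (by omega) _ (by omega) hdpi _
    (fun c hc => by
      rw [PySem.List.mem_pyRange_iff_of_pos (by norm_num)] at hc
      omega) none]
  rw [coreLemma num k i hk h1 hi, dpSpec_set k num i (by omega) hi]

theorem dp0_eq (k num : Int) (h : 0 ≤ num) :
    ([some 0] ++ List.replicate num.toNat (none : Option Int)) = dpSpec k num 0 := by
  apply List.ext_getElem
  · simp [dpSpec]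
  · intro n h1 h2
    unfold dpSpec
    simp only [List.getElem_map, List.getElem_range]
    cases n with
    | zero =>
      simp [G]
    | succ n =>
      simp only [List.length_append, List.length_cons, List.length_nil,
        List.length_replicate] at h1
      rw [List.getElem_append_right (by simp)]
      simp only [List.length_cons, List.length_nil]
      rw [List.getElem_replicate]
      rw [if_neg (by push_cast; omega)]

theorem outer (num k : Int) (hk : 0 ≤ k) (hnum : 1 ≤ num) : ∀ (n : ℕ), (n : Int) ≤ num →
    (PySem.List.pyRange 1 ((n : Int) + 1) 1).foldl
      (fun dp i => (PySem.List.pyRange k (num + 1) 10).foldl (fun d cand => aInner d i cand) dp)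
      ([some 0] ++ List.replicate num.toNat (none : Option Int))
      = dpSpec k num (n : Int) := by
  intro n
  induction n with
  | zero =>
    intro _
    rw [PySem.List.pyRange_one_eq_nil (by norm_num)]
    rw [List.foldl_nil]
    exact dp0_eq k num (by omega)
  | succ n ih =>
    intro hle
    have hc : ((n + 1 : ℕ) : Int) + 1 = ((n : Int) + 1) + 1 := by push_cast; ring
    rw [hc, PySem.List.pyRange_one_succ_right (by omega)]
    rw [List.foldl_append]
    rw [ih (by push_cast at hle ⊢; omega)]
    have hstep := inner num k ((n : Int) + 1) hk (by omega) (by push_cast at hle; omega)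
    have : (n : Int) + 1 - 1 = (n : Int) := by ring
    rw [this] at hstep
    simp only [List.foldl_cons, List.foldl_nil]
    rw [hstep]
    congr 1

theorem zero_eq (k : Int) : minimumNumbers 0 k = minimumNumbers_alt 0 k := by
  unfold minimumNumbers minimumNumbers_alt
  rw [PySem.List.pyRange_one_eq_nil (by norm_num)]
  simp only [List.foldl_nil]
  simp [PySem.List.pyGet?, PySem.List.pyIdx?]

theorem a_neg_one (k : Int) : minimumNumbers (-1) k = 0 := by
  unfold minimumNumbers
  rw [PySem.List.pyRange_one_eq_nil (by norm_num)]
  simp only [List.foldl_nil]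
  rfl

theorem altLoop_ne_zero (num k : Int) :
    ∀ l : List Int, (∀ c ∈ l, c ≠ 0) → altLoop num k l ≠ 0 := by
  intro l
  induction l with
  | nil => intro _; unfold altLoop; norm_num
  | cons c cs ih =>
    intro h
    unfold altLoop
    by_cases hq : c * k ≤ num ∧ PySem.Int.mod (num - c * k) 10 = 0
    · rw [if_pos hq]; exact h c List.mem_cons_self
    · rw [if_neg hq]; exact ih (fun c hc => h c (List.mem_cons.2 (Or.inr hc)))

theorem main_eq (num k : Int) (hk : 0 ≤ k) (hnum : 1 ≤ num) :
    minimumNumbers num k = minimumNumbers_alt num k := by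
  unfold minimumNumbers minimumNumbers_alt
  have hcast : ((num.toNat : Int)) = num := by omega
  have houter := outer num k hk hnum num.toNat (by omega)
  rw [hcast] at houter
  simp only
  rw [houter]
  rw [dpSpec_get k num num num (by omega) (le_refl num), if_pos (le_refl num)]
  rw [if_neg (by omega)]
  have halt := altLoop_eq_gfind num k 10 1
  rw [show (1 : Int) + ((10 : ℕ) : Int) = 11 by norm_num] at halt
  rw [halt]
  unfold G
  rw [if_neg (by omega)]
  cases gfind num k 10 1 <;> rfl

-- ===== VERDICT (by name: the statement is the Claim_ definition above) =====
theorem minimumNumbers_spec : Claim_unchanged_minimumNumbers := by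
  intro num k _ hpre hnd
  unfold Pre_minimumNumbers at hpre
  unfold D_minimumNumbers at hnd
  by_cases h0 : num = 0
  · subst h0; exact zero_eq k
  · have h1 : 1 ≤ num := by omega
    have hk : 0 ≤ k := by
      rcases hpre.2 with h | h
      · omega
      · exact h
    exact main_eq num k hk h1

theorem minimumNumbers_changed : Claim_changed_minimumNumbers := by
  unfold Claim_changed_minimumNumbers; decide

theorem minimumNumbers_tight : Claim_exact_minimumNumbers := by
  intro num k _ _ hd
  unfold D_minimumNumbers at hd
  subst hd
  rw [a_neg_one k]
  unfold minimumNumbers_alt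
  rw [if_neg (by norm_num)]
  intro hc
  refine altLoop_ne_zero (-1) k _ ?_ hc.symm
  intro c hcmem
  rw [PySem.List.mem_pyRange_one] at hcmem
  omega
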